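-- pv_equiv track=rewrite | github.com/ShkodranBiqkaj/Python-Stealth-Game | Classes/Game.py | dfs_euler
-- ===== SOURCE A (Python) =====
-- def get_neighbors(cell):
--     col, row = cell
--     return [(col+1, row), (col, row+1), (col-1, row), (col, row-1)]
--
-- def dfs_euler(start, region):
--     route, vis = [], set()
--     def dfs(v):
--         vis.add(v)
--         route.append(v)
--         for nb in get_neighbors(v):
--             if nb in region and nb not in vis:
--                 dfs(nb)
--                 route.append(v)
--     dfs(start)
--     return route
-- ===== SOURCE B (Python) =====
-- def get_neighbors(cell):
--     col, row = cell
--     return [(col+1, row), (col, row+1), (col-1, row), (col, row-1)]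
--
-- def dfs_euler(start, region):
--     rset = set(region)
--     vis = {start}
--     route = [start]
--     stack = [(start, 0, None)]
--     while stack:
--         v, i, parent = stack[-1]
--         nbs = get_neighbors(v)
--         while i < len(nbs) and (nbs[i] not in rset or nbs[i] in vis):
--             i += 1
--         if i < len(nbs):
--             nb = nbs[i]
--             stack[-1] = (v, i + 1, parent)
--             vis.add(nb)
--             route.append(nb)
--             stack.append((nb, 0, v))
--         else:
--             stack.pop()
--             if parent is not None:
--                 route.append(parent)
--     return route
-- ===== Notes on version B (the rewrite author's own statement) =====
-- stated objective: alternative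
-- what changed: Recursive DFS with mutable closure state is replaced by an explicit-stack iteration whose frames store (node, next-neighbor-index, parent), appending the parent at pop time, and the region list is hashed into a set once so each membership test is a set lookup instead of a list scan.
import Mathlib
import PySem

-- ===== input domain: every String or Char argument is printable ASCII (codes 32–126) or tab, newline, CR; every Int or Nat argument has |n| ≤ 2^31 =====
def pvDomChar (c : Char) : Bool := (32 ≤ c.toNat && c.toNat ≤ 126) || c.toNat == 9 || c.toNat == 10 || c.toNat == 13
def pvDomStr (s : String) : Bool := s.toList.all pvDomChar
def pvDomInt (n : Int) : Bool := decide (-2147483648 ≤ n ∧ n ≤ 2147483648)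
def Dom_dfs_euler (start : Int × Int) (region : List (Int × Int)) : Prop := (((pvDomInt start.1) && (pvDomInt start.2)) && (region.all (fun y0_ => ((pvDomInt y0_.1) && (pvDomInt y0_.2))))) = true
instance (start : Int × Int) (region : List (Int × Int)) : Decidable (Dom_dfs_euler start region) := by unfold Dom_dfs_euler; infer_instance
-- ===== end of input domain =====

-- B replaces A's recursive DFS (mutable closure state) by an explicit-stack iteration with
-- (node, next-neighbor-index, parent) frames and hashes the region into a set once, so each
-- membership test is a set lookup instead of a list scan.

-- ===== PORT A =====
def get_neighbors (cell : Int × Int) : List (Int × Int) :=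
  [(cell.1 + 1, cell.2), (cell.1, cell.2 + 1), (cell.1 - 1, cell.2), (cell.1, cell.2 - 1)]

mutual
-- dfs(v): vis.add(v); route.append(v); then the for-loop over get_neighbors(v).
-- fuel only makes the recursion total; at the fuel chosen in dfs_euler the 0-case is never reached.
def dfsVisitA (region : List (Int × Int)) : Nat → PySem.Set (Int × Int) → List (Int × Int) → Int × Int → List (Int × Int) × PySem.Set (Int × Int)
  | 0, vis, route, _ => (route, vis)
  | fuel + 1, vis, route, v =>
      dfsLoopA region fuel (PySem.Set.add vis v) (route ++ [v]) v (get_neighbors v)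
  termination_by fuel _ _ _ => (fuel, 0)

-- the for-loop: 'if nb in region and nb not in vis: dfs(nb); route.append(v)'
def dfsLoopA (region : List (Int × Int)) : Nat → PySem.Set (Int × Int) → List (Int × Int) → Int × Int → List (Int × Int) → List (Int × Int) × PySem.Set (Int × Int)
  | _, vis, route, _, [] => (route, vis)
  | fuel, vis, route, v, nb :: rest =>
      if region.contains nb && !(PySem.Set.contains vis nb) then
        let p := dfsVisitA region fuel vis route nb
        dfsLoopA region fuel p.2 (p.1 ++ [v]) v rest
      else
        dfsLoopA region fuel vis route v rest
  termination_by fuel _ _ _ nbs => (fuel, nbs.length + 1)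
end

def dfs_euler (start : Int × Int) (region : List (Int × Int)) : List (Int × Int) :=
  (dfsVisitA region (region.length + 3) PySem.Set.empty [] start).1

-- ===== PORT B =====
-- 'if parent is not None: route.append(parent)'
def popApp (route : List (Int × Int)) (par : Option (Int × Int)) : List (Int × Int) :=
  match par with
  | some p => route ++ [p]
  | none => route

-- the inner while: advance i past neighbors that are not in rset or already visited
def scanIdxB (rset vis : PySem.Set (Int × Int)) (nbs : List (Int × Int)) (i : Nat) : Nat :=
  if h : i < nbs.length then
    if !(PySem.Set.contains rset (nbs[i]'h)) || PySem.Set.contains vis (nbs[i]'h) then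
      scanIdxB rset vis nbs (i + 1)
    else i
  else i
termination_by nbs.length - i

-- termination measure for the machine: number of rset cells not yet visited
def unvisB (rs : List (Int × Int)) (vis : PySem.Set (Int × Int)) : Nat :=
  (rs.filter (fun c => !(PySem.Set.contains vis c))).length

-- lemmas the machine's termination proof cites by name
theorem length_filter_mono {α : Type} (l : List α) (p q : α → Bool)
    (h : ∀ x, p x = true → q x = true) : (l.filter p).length ≤ (l.filter q).length := by
  induction l with
  | nil => simp
  | cons a l ih =>
    by_cases hp : p a = true
    · simp [List.filter, hp, h a hp]; omega
    · cases hq : q a <;> simp [List.filter, hp, hq] <;> omega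

theorem length_filter_lt {α : Type} (l : List α) (p q : α → Bool)
    (h : ∀ x, p x = true → q x = true) (c : α) (hc : c ∈ l) (hqc : q c = true)
    (hpc : p c = false) : (l.filter p).length < (l.filter q).length := by
  induction l with
  | nil => simp at hc
  | cons a l ih =>
    rcases List.mem_cons.mp hc with rfl | hc
    · have hle := length_filter_mono l p q h
      simp [List.filter, hpc, hqc]
      omega
    · have hlt := ih hc
      by_cases hp : p a = true
      · simp [List.filter, hp, h a hp]; omega
      · cases hq : q a <;> simp [List.filter, hp, hq] <;> omega

theorem contains_false_iff (s : PySem.Set (Int × Int)) (x : Int × Int) :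
    s.contains x = false ↔ x ∉ s := by
  constructor
  · intro h hm
    rw [(PySem.Set.contains_iff _ _).mpr hm] at h
    cases h
  · intro hm
    cases h : s.contains x
    · rfl
    · exact absurd ((PySem.Set.contains_iff _ _).mp h) hm

theorem unvis_add_lt (rs : List (Int × Int)) (vis : PySem.Set (Int × Int)) (c : Int × Int)
    (hc : c ∈ rs) (hvc : PySem.Set.contains vis c = false) :
    unvisB rs (PySem.Set.add vis c) < unvisB rs vis := by
  refine length_filter_lt rs _ _ ?_ c hc ?_ ?_
  · intro x hx
    simp only [Bool.not_eq_true'] at hx ⊢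
    rw [contains_false_iff] at hx ⊢
    exact fun hm => hx ((PySem.Set.mem_add _ _ _).mpr (Or.inl hm))
  · simp only [Bool.not_eq_true']
    exact hvc
  · simp only [Bool.not_eq_false']
    exact (PySem.Set.contains_iff _ _).mpr ((PySem.Set.mem_add _ _ _).mpr (Or.inr rfl))

theorem scanIdxB_elig (rset vis : PySem.Set (Int × Int)) (nbs : List (Int × Int)) :
    ∀ k i j, nbs.length - i ≤ k → scanIdxB rset vis nbs i = j → (h : j < nbs.length) →
    PySem.Set.contains rset (nbs[j]'h) = true ∧ PySem.Set.contains vis (nbs[j]'h) = false := by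
  intro k
  induction k with
  | zero =>
    intro i j hk hscan h
    rw [scanIdxB] at hscan
    rw [dif_neg (by omega)] at hscan
    omega
  | succ k ih =>
    intro i j hk hscan h
    rw [scanIdxB] at hscan
    by_cases hi : i < nbs.length
    · rw [dif_pos hi] at hscan
      by_cases hskip : (!(PySem.Set.contains rset (nbs[i]'hi)) || PySem.Set.contains vis (nbs[i]'hi)) = true
      · rw [if_pos hskip] at hscan
        exact ih (i + 1) j (by omega) hscan h
      · rw [if_neg hskip] at hscan
        subst hscan
        simp only [Bool.or_eq_true, Bool.not_eq_true'] at hskip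
        rw [not_or] at hskip
        exact ⟨by simpa using hskip.1, by simpa using hskip.2⟩
    · rw [dif_neg hi] at hscan
      omega

-- the main while-loop of B
def machineB (rset vis : PySem.Set (Int × Int)) (route : List (Int × Int))
    (stack : List ((Int × Int) × Nat × Option (Int × Int))) : List (Int × Int) :=
  match stack with
  | [] => route
  | (v, i, par) :: stk =>
    if h : scanIdxB rset vis (get_neighbors v) i < (get_neighbors v).length then
      machineB rset (PySem.Set.add vis ((get_neighbors v)[scanIdxB rset vis (get_neighbors v) i]'h))
        (route ++ [(get_neighbors v)[scanIdxB rset vis (get_neighbors v) i]'h])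
        (((get_neighbors v)[scanIdxB rset vis (get_neighbors v) i]'h, 0, some v)
          :: (v, scanIdxB rset vis (get_neighbors v) i + 1, par) :: stk)
    else
      machineB rset vis (popApp route par) stk
termination_by (unvisB rset vis, stack.length)
decreasing_by
  · have helig := scanIdxB_elig rset vis (get_neighbors v) (get_neighbors v).length i
      (scanIdxB rset vis (get_neighbors v) i) (Nat.sub_le _ _) rfl h
    exact Prod.Lex.left _ _ (unvis_add_lt rset vis _
      ((PySem.Set.contains_iff _ _).mp helig.1) helig.2)
  · simp only [List.length_cons]
    exact Prod.Lex.right _ (Nat.lt_succ_self _)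

def dfs_euler_alt (start : Int × Int) (region : List (Int × Int)) : List (Int × Int) :=
  machineB (PySem.Set.ofList region) (PySem.Set.ofList [start]) [start] [(start, 0, none)]

-- ===== PRECONDITION & SPEC =====
def Spec_dfs_euler (start : Int × Int) (region : List (Int × Int)) (out : List (Int × Int)) : Prop := out = dfs_euler_alt start region
instance (start : Int × Int) (region : List (Int × Int)) (out : List (Int × Int)) : Decidable (Spec_dfs_euler start region out) := by unfold Spec_dfs_euler; infer_instance

-- ===== CLAIM (what is proved, stated in full; the proofs are below) =====
def Claim_equal_dfs_euler : Prop := ∀ (start : Int × Int) (region : List (Int × Int)), Dom_dfs_euler start region → Spec_dfs_euler start region (dfs_euler start region)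

-- ===== LEMMAS AND PROOFS =====

theorem contains_add_mono (vis : PySem.Set (Int × Int)) (c x : Int × Int)
    (hx : PySem.Set.contains vis x = true) :
    PySem.Set.contains (PySem.Set.add vis c) x = true := by
  rw [PySem.Set.contains_iff] at hx ⊢
  exact (PySem.Set.mem_add _ _ _).mpr (Or.inl hx)

theorem contains_ofList_eq (rs : List (Int × Int)) (x : Int × Int) :
    PySem.Set.contains (PySem.Set.ofList rs) x = rs.contains x := by
  cases h : rs.contains x
  · rw [contains_false_iff]
    intro hm
    rw [List.contains_iff_mem.mpr ((PySem.Set.mem_ofList _ _).mp hm)] at h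
    cases h
  · exact (PySem.Set.contains_iff _ _).mpr
      ((PySem.Set.mem_ofList _ _).mpr (List.contains_iff_mem.mp h))

-- visiting only grows vis
theorem monoA (region : List (Int × Int)) : ∀ fuel : Nat,
    (∀ vis route v x, PySem.Set.contains vis x = true →
      PySem.Set.contains (dfsVisitA region fuel vis route v).2 x = true)
  ∧ (∀ nbs vis route v x, PySem.Set.contains vis x = true →
      PySem.Set.contains (dfsLoopA region fuel vis route v nbs).2 x = true) := by
  intro fuel
  induction fuel using Nat.strong_induction_on with
  | _ fuel ih =>
    have hv : ∀ vis route v x, PySem.Set.contains vis x = true →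
        PySem.Set.contains (dfsVisitA region fuel vis route v).2 x = true := by
      intro vis route v x hx
      match fuel with
      | 0 => simpa [dfsVisitA] using hx
      | f + 1 =>
        rw [dfsVisitA]
        exact (ih f (by omega)).2 _ _ _ _ _ (contains_add_mono vis v x hx)
    refine ⟨hv, ?_⟩
    intro nbs
    induction nbs with
    | nil =>
      intro vis route v x hx
      simpa [dfsLoopA] using hx
    | cons nb rest ihr =>
      intro vis route v x hx
      rw [dfsLoopA]
      cases hc : (region.contains nb && !(PySem.Set.contains vis nb))
      · rw [if_neg (by simp)]
        exact ihr vis route v x hx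
      · rw [if_pos rfl]
        exact ihr _ _ v x (hv vis route nb x hx)

theorem unvis_loopA_le (rs region : List (Int × Int)) (fuel : Nat) (vis : PySem.Set (Int × Int))
    (route : List (Int × Int)) (v : Int × Int) (nbs : List (Int × Int)) :
    unvisB rs (dfsLoopA region fuel vis route v nbs).2 ≤ unvisB rs vis := by
  refine length_filter_mono rs _ _ ?_
  intro x hx
  simp only [Bool.not_eq_true'] at hx ⊢
  rw [contains_false_iff] at hx ⊢
  intro hm
  exact hx ((PySem.Set.contains_iff _ _).mp
    ((monoA region fuel).2 nbs vis route v x ((PySem.Set.contains_iff _ _).mpr hm)))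

-- skipping ineligible neighbors is a no-op for A's loop
theorem dfsLoopA_skip (region : List (Int × Int)) (fuel : Nat) (nbs : List (Int × Int)) :
    ∀ k i (vis : PySem.Set (Int × Int)) (route : List (Int × Int)) (v : Int × Int),
    nbs.length - i ≤ k →
    dfsLoopA region fuel vis route v (nbs.drop (scanIdxB (PySem.Set.ofList region) vis nbs i))
      = dfsLoopA region fuel vis route v (nbs.drop i) := by
  intro k
  induction k with
  | zero =>
    intro i vis route v hk
    rw [scanIdxB, dif_neg (by omega)]
  | succ k ih =>
    intro i vis route v hk
    rw [scanIdxB]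
    by_cases hi : i < nbs.length
    · rw [dif_pos hi]
      by_cases hskip : (!(PySem.Set.contains (PySem.Set.ofList region) (nbs[i]'hi))
          || PySem.Set.contains vis (nbs[i]'hi)) = true
      · rw [if_pos hskip]
        have hdrop : nbs.drop i = nbs[i]'hi :: nbs.drop (i + 1) :=
          List.drop_eq_getElem_cons hi
        have hcond : (region.contains (nbs[i]'hi) && !(PySem.Set.contains vis (nbs[i]'hi))) = false := by
          rcases Bool.or_eq_true_iff.mp hskip with hr | hv
          · rw [Bool.not_eq_true'] at hr
            rw [contains_ofList_eq] at hr
            simp only [hr, Bool.false_and]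
          · simp only [hv, Bool.not_true, Bool.and_false]
        rw [hdrop, dfsLoopA, if_neg (by rw [hcond]; exact Bool.false_ne_true)]
        exact ih (i + 1) vis route v (by omega)
      · rw [if_neg hskip]
    · rw [dif_neg hi]

-- the machine processes the top frame exactly like A's neighbor loop, then pops
theorem machineB_run (region : List (Int × Int)) : ∀ n : Nat,
    ∀ (fuel : Nat) (vis : PySem.Set (Int × Int)) (route : List (Int × Int)) (v : Int × Int)
      (i : Nat) (par : Option (Int × Int)) (stk : List ((Int × Int) × Nat × Option (Int × Int))),
    unvisB (PySem.Set.ofList region) vis = n → n < fuel →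
    machineB (PySem.Set.ofList region) vis route ((v, i, par) :: stk)
      = machineB (PySem.Set.ofList region)
          (dfsLoopA region fuel vis route v ((get_neighbors v).drop i)).2
          (popApp (dfsLoopA region fuel vis route v ((get_neighbors v).drop i)).1 par) stk := by
  intro n
  induction n using Nat.strong_induction_on with
  | _ n ih =>
    intro fuel vis route v i par stk hn hf
    subst hn
    conv_lhs => rw [machineB]
    by_cases h : scanIdxB (PySem.Set.ofList region) vis (get_neighbors v) i < (get_neighbors v).length
    · rw [dif_pos h]
      have helig := scanIdxB_elig (PySem.Set.ofList region) vis (get_neighbors v)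
        (get_neighbors v).length i (scanIdxB (PySem.Set.ofList region) vis (get_neighbors v) i)
        (Nat.sub_le _ _) rfl h
      have hmemset : (get_neighbors v)[scanIdxB (PySem.Set.ofList region) vis (get_neighbors v) i]'h
          ∈ PySem.Set.ofList region := (PySem.Set.contains_iff _ _).mp helig.1
      have hcond : (region.contains ((get_neighbors v)[scanIdxB (PySem.Set.ofList region) vis (get_neighbors v) i]'h)
          && !(PySem.Set.contains vis ((get_neighbors v)[scanIdxB (PySem.Set.ofList region) vis (get_neighbors v) i]'h))) = true := by
        rw [Bool.and_eq_true]
        constructor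
        · rw [← contains_ofList_eq]
          exact helig.1
        · rw [Bool.not_eq_true']
          exact helig.2
      have h2 : unvisB (PySem.Set.ofList region)
          (PySem.Set.add vis ((get_neighbors v)[scanIdxB (PySem.Set.ofList region) vis (get_neighbors v) i]'h))
          < unvisB (PySem.Set.ofList region) vis :=
        unvis_add_lt _ vis _ hmemset helig.2
      have hn1 : 1 ≤ unvisB (PySem.Set.ofList region) vis := by omega
      obtain ⟨f, rfl⟩ : ∃ f, fuel = f + 1 := ⟨fuel - 1, by omega⟩
      -- rewrite the A side: skip the ineligible prefix, take the found neighbor, recurse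
      conv_rhs => rw [← dfsLoopA_skip region (f + 1) (get_neighbors v) (get_neighbors v).length
        i vis route v (Nat.sub_le _ _)]
      conv_rhs => rw [List.drop_eq_getElem_cons h]
      conv_rhs => rw [dfsLoopA]
      rw [if_pos hcond]
      conv_rhs => rw [dfsVisitA]
      -- run the machine over the pushed child frame
      rw [ih _ h2 f _ _ _ 0 (some v) _ rfl (by omega)]
      simp only [List.drop_zero, popApp]
      -- and then over the resumed parent frame
      have h3 : unvisB (PySem.Set.ofList region)
          (dfsLoopA region f
            (PySem.Set.add vis ((get_neighbors v)[scanIdxB (PySem.Set.ofList region) vis (get_neighbors v) i]'h))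
            (route ++ [(get_neighbors v)[scanIdxB (PySem.Set.ofList region) vis (get_neighbors v) i]'h])
            ((get_neighbors v)[scanIdxB (PySem.Set.ofList region) vis (get_neighbors v) i]'h)
            (get_neighbors ((get_neighbors v)[scanIdxB (PySem.Set.ofList region) vis (get_neighbors v) i]'h))).2
          < unvisB (PySem.Set.ofList region) vis :=
        lt_of_le_of_lt (unvis_loopA_le _ _ _ _ _ _ _) h2
      rw [ih _ h3 (f + 1) _ _ v (scanIdxB (PySem.Set.ofList region) vis (get_neighbors v) i + 1)
        par stk rfl (by omega)]
      rfl
    · rw [dif_neg h]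
      conv_rhs => rw [← dfsLoopA_skip region fuel (get_neighbors v) (get_neighbors v).length
        i vis route v (Nat.sub_le _ _)]
      rw [List.drop_eq_nil_of_le (by omega), dfsLoopA]

-- ===== VERDICT (by name: the statement is the Claim_ definition above) =====
theorem dfs_euler_spec : Claim_equal_dfs_euler := by
  unfold Claim_equal_dfs_euler Spec_dfs_euler
  intro start region _
  unfold dfs_euler dfs_euler_alt
  have hstart : PySem.Set.ofList [start] = PySem.Set.add PySem.Set.empty start := rfl
  have hlen : unvisB (PySem.Set.ofList region) (PySem.Set.ofList [start]) < region.length + 2 := by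
    have h1 : unvisB (PySem.Set.ofList region) (PySem.Set.ofList [start])
        ≤ (PySem.Set.ofList region).length := List.length_filter_le _ _
    have h2 := PySem.Set.length_ofList_le (xs := region)
    omega
  have hrun := machineB_run region _ (region.length + 2) (PySem.Set.ofList [start]) [start]
    start 0 none [] rfl hlen
  rw [hrun]
  simp only [List.drop_zero] at *
  rw [machineB]
  show (dfsVisitA region (region.length + 2 + 1) PySem.Set.empty [] start).1 = _
  rw [dfsVisitA]
  rw [hstart]
  rfl
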